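-- pv_equiv track=rewrite | github.com/Victor-Dixon/Dream.os | tools/tool_inventory_system.py | _analyze_capabilities
-- ===== SOURCE A (Python) =====
-- from typing import Dict, List, Any, Optional, Set
--
-- def _analyze_capabilities(content: str, functions: List[Dict]) -> List[str]:
--     """Analyze what capabilities a tool provides"""
--     capabilities = []
--     content_lower = content.lower()
--     function_names = [f["name"].lower() for f in functions]
--
--     # WordPress capabilities
--     if any(word in content_lower for word in ["wordpress", "wp_cli", "post create"]):
--         capabilities.append("wordpress_management")
--     if any(word in content_lower for word in ["page", "post", "content"]):
--         capabilities.append("content_management")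
--
--     # Validation capabilities
--     if any(word in content_lower for word in ["validate", "check", "test", "verify"]):
--         capabilities.append("validation")
--     if any(word in content_lower for word in ["http", "requests", "url"]):
--         capabilities.append("http_validation")
--
--     # SSH/Remote capabilities
--     if any(word in content_lower for word in ["ssh", "paramiko", "remote", "server"]):
--         capabilities.append("remote_operations")
--
--     # Reporting capabilities
--     if any(word in content_lower for word in ["report", "summary", "analytics"]):
--         capabilities.append("reporting")
--
--     # System management
--     if any(word in content_lower for word in ["agent", "onboard", "workspace"]):
--         capabilities.append("system_management")
--
--     # Function-based capabilities
--     if any(name in function_names for name in ["create_page", "update_post", "validate_url"]):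
--         capabilities.append("wordpress_operations")
--     if any(name in function_names for name in ["run_validation", "check_status"]):
--         capabilities.append("validation_operations")
--
--     return list(set(capabilities))
-- ===== SOURCE B (Python) =====
-- # Inverted-index rewrite: a flat keyword->label map scanned once into a 'found'
-- # set, a per-function-name dict lookup (no scan over rule name lists), and the
-- # result emitted by filtering a canonical label order against the found set
-- # (equal to A's list(set(...)) as a set of labels; A's list order is hash-random).
-- from typing import Dict, List
--
-- _KEYWORD_LABEL = {
--     "wordpress": "wordpress_management", "wp_cli": "wordpress_management",
--     "post create": "wordpress_management",
--     "page": "content_management", "post": "content_management",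
--     "content": "content_management",
--     "validate": "validation", "check": "validation", "test": "validation",
--     "verify": "validation",
--     "http": "http_validation", "requests": "http_validation",
--     "url": "http_validation",
--     "ssh": "remote_operations", "paramiko": "remote_operations",
--     "remote": "remote_operations", "server": "remote_operations",
--     "report": "reporting", "summary": "reporting", "analytics": "reporting",
--     "agent": "system_management", "onboard": "system_management",
--     "workspace": "system_management",
-- }
--
-- _NAME_LABEL = {
--     "create_page": "wordpress_operations", "update_post": "wordpress_operations",
--     "validate_url": "wordpress_operations",
--     "run_validation": "validation_operations", "check_status": "validation_operations",
-- }
--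
-- _LABEL_ORDER = [
--     "wordpress_management", "content_management", "validation",
--     "http_validation", "remote_operations", "reporting", "system_management",
--     "wordpress_operations", "validation_operations",
-- ]
--
-- def _analyze_capabilities(content: str, functions: List[Dict]) -> List[str]:
--     content_lower = content.lower()
--     found = set()
--     for keyword, label in _KEYWORD_LABEL.items():
--         if keyword in content_lower:
--             found.add(label)
--     for f in functions:
--         label = _NAME_LABEL.get(f["name"].lower())
--         if label is not None:
--             found.add(label)
--     return [label for label in _LABEL_ORDER if label in found]
-- ===== Notes on version B (the rewrite author's own statement) =====
-- stated objective: alternative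
-- what changed: Inverts the data flow: a flat keyword->label index is scanned once accumulating a 'found' set, each function name is resolved by a single dict lookup instead of scanning rule name lists, and the output is emitted by filtering a canonical label order against the found set, replacing A's eight per-label any() blocks plus final list(set(...)).
import Mathlib
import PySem

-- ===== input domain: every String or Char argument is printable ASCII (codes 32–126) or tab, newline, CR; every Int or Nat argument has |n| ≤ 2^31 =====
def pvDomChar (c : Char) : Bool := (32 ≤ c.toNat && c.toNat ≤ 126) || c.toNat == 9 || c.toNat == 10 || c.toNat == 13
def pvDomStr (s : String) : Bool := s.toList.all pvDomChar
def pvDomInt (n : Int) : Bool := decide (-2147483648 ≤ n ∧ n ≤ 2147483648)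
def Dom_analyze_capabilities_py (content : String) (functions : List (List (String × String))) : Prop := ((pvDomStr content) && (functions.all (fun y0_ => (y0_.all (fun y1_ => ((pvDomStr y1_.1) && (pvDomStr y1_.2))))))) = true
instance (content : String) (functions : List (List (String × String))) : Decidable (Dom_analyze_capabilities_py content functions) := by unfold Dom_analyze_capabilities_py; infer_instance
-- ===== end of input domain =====

-- B inverts A's data flow: a flat keyword→label index scanned once into a 'found'
-- set, a dict lookup per function name instead of a scan over rule name lists, and
-- the output emitted as the canonical label order filtered by the found set; equal
-- to A's list(set(...)) as a list of distinct labels (A's Python order is hash order).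

-- ===== PORT A =====
def analyze_capabilities_py (content : String) (functions : List (List (String × String))) : List String :=
  let content_lower := PySem.Str.lower content
  let function_names := functions.map (fun f => PySem.Str.lower (((PySem.Dict.mk f).get? "name").getD ""))
  let capabilities : List String := []
  let capabilities := if (["wordpress", "wp_cli", "post create"].any (fun w => PySem.Str.isIn w content_lower)) then capabilities ++ ["wordpress_management"] else capabilities
  let capabilities := if (["page", "post", "content"].any (fun w => PySem.Str.isIn w content_lower)) then capabilities ++ ["content_management"] else capabilities
  let capabilities := if (["validate", "check", "test", "verify"].any (fun w => PySem.Str.isIn w content_lower)) then capabilities ++ ["validation"] else capabilities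
  let capabilities := if (["http", "requests", "url"].any (fun w => PySem.Str.isIn w content_lower)) then capabilities ++ ["http_validation"] else capabilities
  let capabilities := if (["ssh", "paramiko", "remote", "server"].any (fun w => PySem.Str.isIn w content_lower)) then capabilities ++ ["remote_operations"] else capabilities
  let capabilities := if (["report", "summary", "analytics"].any (fun w => PySem.Str.isIn w content_lower)) then capabilities ++ ["reporting"] else capabilities
  let capabilities := if (["agent", "onboard", "workspace"].any (fun w => PySem.Str.isIn w content_lower)) then capabilities ++ ["system_management"] else capabilities
  let capabilities := if (["create_page", "update_post", "validate_url"].any (fun n => function_names.contains n)) then capabilities ++ ["wordpress_operations"] else capabilities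
  let capabilities := if (["run_validation", "check_status"].any (fun n => function_names.contains n)) then capabilities ++ ["validation_operations"] else capabilities
  PySem.Set.ofList capabilities

-- ===== PORT B =====
def keywordLabel : List (String × String) :=
  [("wordpress", "wordpress_management"), ("wp_cli", "wordpress_management"),
   ("post create", "wordpress_management"),
   ("page", "content_management"), ("post", "content_management"),
   ("content", "content_management"),
   ("validate", "validation"), ("check", "validation"), ("test", "validation"),
   ("verify", "validation"),
   ("http", "http_validation"), ("requests", "http_validation"),
   ("url", "http_validation"),
   ("ssh", "remote_operations"), ("paramiko", "remote_operations"),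
   ("remote", "remote_operations"), ("server", "remote_operations"),
   ("report", "reporting"), ("summary", "reporting"), ("analytics", "reporting"),
   ("agent", "system_management"), ("onboard", "system_management"),
   ("workspace", "system_management")]

def nameLabel : List (String × String) :=
  [("create_page", "wordpress_operations"), ("update_post", "wordpress_operations"),
   ("validate_url", "wordpress_operations"),
   ("run_validation", "validation_operations"), ("check_status", "validation_operations")]

def labelOrder : List String :=
  ["wordpress_management", "content_management", "validation",
   "http_validation", "remote_operations", "reporting", "system_management",
   "wordpress_operations", "validation_operations"]

def analyze_capabilities_py_alt (content : String) (functions : List (List (String × String))) : List String :=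
  let content_lower := PySem.Str.lower content
  let found : PySem.Set String :=
    keywordLabel.foldl
      (fun acc kl => if PySem.Str.isIn kl.1 content_lower then PySem.Set.add acc kl.2 else acc)
      PySem.Set.empty
  let found :=
    functions.foldl
      (fun acc f =>
        match (PySem.Dict.mk nameLabel).get? (PySem.Str.lower (((PySem.Dict.mk f).get? "name").getD "")) with
        | some label => PySem.Set.add acc label
        | none => acc)
      found
  labelOrder.filter (fun l => PySem.Set.contains found l)

-- ===== PRECONDITION & SPEC =====
-- Pre_ excludes exactly the inputs on which Python raises KeyError: a function dict without a "name" key.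
def Pre_analyze_capabilities_py (content : String) (functions : List (List (String × String))) : Prop :=
  (functions.all (fun f => (PySem.Dict.mk f).contains "name")) = true
instance (content : String) (functions : List (List (String × String))) : Decidable (Pre_analyze_capabilities_py content functions) := by unfold Pre_analyze_capabilities_py; infer_instance

def pvWitness_analyze_capabilities_py : String × (List (List (String × String))) :=
  ("wordpress page check", [[("name", "create_page")]])

def Spec_analyze_capabilities_py (content : String) (functions : List (List (String × String))) (out : List String) : Prop := out = analyze_capabilities_py_alt content functions
instance (content : String) (functions : List (List (String × String))) (out : List String) : Decidable (Spec_analyze_capabilities_py content functions out) := by unfold Spec_analyze_capabilities_py; infer_instance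

-- ===== CLAIM (what is proved, stated in full; the proofs are below) =====
def Claim_equal_analyze_capabilities_py : Prop := ∀ (content : String) (functions : List (List (String × String))), Dom_analyze_capabilities_py content functions → Pre_analyze_capabilities_py content functions → Spec_analyze_capabilities_py content functions (analyze_capabilities_py content functions)

-- ===== LEMMAS AND PROOFS =====

-- the common normal form of both ports: one conditional singleton per label, in canonical order
def chainForm (b1 b2 b3 b4 b5 b6 b7 b8 b9 : Bool) : List String :=
  (if b1 then ["wordpress_management"] else []) ++ (if b2 then ["content_management"] else []) ++
  (if b3 then ["validation"] else []) ++ (if b4 then ["http_validation"] else []) ++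
  (if b5 then ["remote_operations"] else []) ++ (if b6 then ["reporting"] else []) ++
  (if b7 then ["system_management"] else []) ++ (if b8 then ["wordpress_operations"] else []) ++
  (if b9 then ["validation_operations"] else [])

-- membership in the keyword-scan fold
theorem mem_fold_keyword (cl : String) (L : List (String × String)) (s : PySem.Set String) (y : String) :
    y ∈ L.foldl (fun acc kl => if PySem.Str.isIn kl.1 cl then PySem.Set.add acc kl.2 else acc) s
      ↔ y ∈ s ∨ ∃ kl ∈ L, PySem.Str.isIn kl.1 cl = true ∧ y = kl.2 := by
  induction L generalizing s with
  | nil => simp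
  | cons hd tl ih =>
    simp only [List.foldl_cons, List.exists_mem_cons_iff]
    by_cases h : PySem.Str.isIn hd.1 cl = true
    · rw [if_pos h, ih, PySem.Set.mem_add]
      simp only [h, true_and]
      tauto
    · rw [if_neg h, ih]
      simp only [h, false_and, false_or]
      tauto

-- membership in the name-lookup fold
theorem mem_fold_name {α : Type} (g : α → Option String) (L : List α) (s : PySem.Set String) (y : String) :
    y ∈ L.foldl (fun acc f => match g f with | some label => PySem.Set.add acc label | none => acc) s
      ↔ y ∈ s ∨ ∃ f ∈ L, g f = some y := by
  induction L generalizing s with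
  | nil => simp
  | cons hd tl ih =>
    simp only [List.foldl_cons, List.exists_mem_cons_iff]
    cases hg : g hd with
    | none =>
      rw [ih]
      simp only [hg]
      constructor
      · tauto
      · rintro (hs | hgh | hex)
        · exact Or.inl hs
        · exact absurd hgh (by simp)
        · exact Or.inr hex
    | some l =>
      rw [ih, PySem.Set.mem_add]
      simp only [hg, Option.some_inj]
      constructor
      · rintro ((hs | rfl) | hex)
        · exact Or.inl hs
        · exact Or.inr (Or.inl rfl)
        · exact Or.inr (Or.inr hex)
      · rintro (hs | he | hex)
        · exact Or.inl (Or.inl hs)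
        · exact Or.inl (Or.inr he.symm)
        · exact Or.inr hex

-- first-match lookup in the literal name table
theorem lookup_nameLabel (x l : String) :
    ((PySem.Dict.mk nameLabel).get? x = some l) ↔ ∃ p ∈ nameLabel, p.1 = x ∧ p.2 = l := by
  by_cases h1 : "create_page" = x
  · subst h1; simp [nameLabel, PySem.Dict.get?_mk_cons, eq_comm]
  · by_cases h2 : "update_post" = x
    · subst h2; simp [nameLabel, PySem.Dict.get?_mk_cons, eq_comm]
    · by_cases h3 : "validate_url" = x
      · subst h3; simp [nameLabel, PySem.Dict.get?_mk_cons, eq_comm]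
      · by_cases h4 : "run_validation" = x
        · subst h4; simp [nameLabel, PySem.Dict.get?_mk_cons, eq_comm]
        · by_cases h5 : "check_status" = x
          · subst h5; simp [nameLabel, PySem.Dict.get?_mk_cons, eq_comm]
          · simp [nameLabel, PySem.Dict.get?_mk_cons, PySem.Dict.get?,
                  h1, h2, h3, h4, h5, beq_iff_eq]

-- A's chain of conditional appends + set dedup, abstracted over its nine conditions
set_option maxHeartbeats 2000000 in
theorem bridgeA (b1 b2 b3 b4 b5 b6 b7 b8 b9 : Bool) :
    (let caps : List String := []
     let caps := if b1 then caps ++ ["wordpress_management"] else caps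
     let caps := if b2 then caps ++ ["content_management"] else caps
     let caps := if b3 then caps ++ ["validation"] else caps
     let caps := if b4 then caps ++ ["http_validation"] else caps
     let caps := if b5 then caps ++ ["remote_operations"] else caps
     let caps := if b6 then caps ++ ["reporting"] else caps
     let caps := if b7 then caps ++ ["system_management"] else caps
     let caps := if b8 then caps ++ ["wordpress_operations"] else caps
     let caps := if b9 then caps ++ ["validation_operations"] else caps
     PySem.Set.ofList caps)
    = chainForm b1 b2 b3 b4 b5 b6 b7 b8 b9 := by
  cases b1 <;> cases b2 <;> cases b3 <;> cases b4 <;> cases b5 <;> cases b6 <;> cases b7 <;>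
    cases b8 <;> cases b9 <;> rfl

-- B's final pass: filtering the canonical label order is the same chain
set_option maxHeartbeats 1000000 in
theorem filter_labelOrder (f : String → Bool) :
    labelOrder.filter f
      = chainForm (f "wordpress_management") (f "content_management") (f "validation")
          (f "http_validation") (f "remote_operations") (f "reporting") (f "system_management")
          (f "wordpress_operations") (f "validation_operations") := by
  simp only [labelOrder, List.filter_cons, List.filter_nil, chainForm]
  cases f "wordpress_management" <;> cases f "content_management" <;> cases f "validation" <;>
    cases f "http_validation" <;> cases f "remote_operations" <;> cases f "reporting" <;>
    cases f "system_management" <;> cases f "wordpress_operations" <;>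
    cases f "validation_operations" <;> rfl

-- the found-set membership bit for each label equals A's condition for that label
set_option maxHeartbeats 1000000 in
set_option maxRecDepth 8192 in
theorem contains_e1 (content : String) (functions : List (List (String × String))) :
    PySem.Set.contains (functions.foldl
      (fun acc f =>
        match (PySem.Dict.mk nameLabel).get? (PySem.Str.lower (((PySem.Dict.mk f).get? "name").getD "")) with
        | some label => PySem.Set.add acc label
        | none => acc)
      (keywordLabel.foldl
        (fun acc kl => if PySem.Str.isIn kl.1 (PySem.Str.lower content) then PySem.Set.add acc kl.2 else acc)
        PySem.Set.empty)) "wordpress_management" = (["wordpress", "wp_cli", "post create"].any (fun w => PySem.Str.isIn w (PySem.Str.lower content))) := by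
  rw [Bool.eq_iff_iff, PySem.Set.contains_iff, mem_fold_name, mem_fold_keyword]
  simp only [lookup_nameLabel]
  simp [keywordLabel, nameLabel, PySem.Set.empty]

set_option maxHeartbeats 1000000 in
set_option maxRecDepth 8192 in
theorem contains_e2 (content : String) (functions : List (List (String × String))) :
    PySem.Set.contains (functions.foldl
      (fun acc f =>
        match (PySem.Dict.mk nameLabel).get? (PySem.Str.lower (((PySem.Dict.mk f).get? "name").getD "")) with
        | some label => PySem.Set.add acc label
        | none => acc)
      (keywordLabel.foldl
        (fun acc kl => if PySem.Str.isIn kl.1 (PySem.Str.lower content) then PySem.Set.add acc kl.2 else acc)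
        PySem.Set.empty)) "content_management" = (["page", "post", "content"].any (fun w => PySem.Str.isIn w (PySem.Str.lower content))) := by
  rw [Bool.eq_iff_iff, PySem.Set.contains_iff, mem_fold_name, mem_fold_keyword]
  simp only [lookup_nameLabel]
  simp [keywordLabel, nameLabel, PySem.Set.empty]

set_option maxHeartbeats 1000000 in
set_option maxRecDepth 8192 in
theorem contains_e3 (content : String) (functions : List (List (String × String))) :
    PySem.Set.contains (functions.foldl
      (fun acc f =>
        match (PySem.Dict.mk nameLabel).get? (PySem.Str.lower (((PySem.Dict.mk f).get? "name").getD "")) with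
        | some label => PySem.Set.add acc label
        | none => acc)
      (keywordLabel.foldl
        (fun acc kl => if PySem.Str.isIn kl.1 (PySem.Str.lower content) then PySem.Set.add acc kl.2 else acc)
        PySem.Set.empty)) "validation" = (["validate", "check", "test", "verify"].any (fun w => PySem.Str.isIn w (PySem.Str.lower content))) := by
  rw [Bool.eq_iff_iff, PySem.Set.contains_iff, mem_fold_name, mem_fold_keyword]
  simp only [lookup_nameLabel]
  simp [keywordLabel, nameLabel, PySem.Set.empty]

set_option maxHeartbeats 1000000 in
set_option maxRecDepth 8192 in
theorem contains_e4 (content : String) (functions : List (List (String × String))) :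
    PySem.Set.contains (functions.foldl
      (fun acc f =>
        match (PySem.Dict.mk nameLabel).get? (PySem.Str.lower (((PySem.Dict.mk f).get? "name").getD "")) with
        | some label => PySem.Set.add acc label
        | none => acc)
      (keywordLabel.foldl
        (fun acc kl => if PySem.Str.isIn kl.1 (PySem.Str.lower content) then PySem.Set.add acc kl.2 else acc)
        PySem.Set.empty)) "http_validation" = (["http", "requests", "url"].any (fun w => PySem.Str.isIn w (PySem.Str.lower content))) := by
  rw [Bool.eq_iff_iff, PySem.Set.contains_iff, mem_fold_name, mem_fold_keyword]
  simp only [lookup_nameLabel]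
  simp [keywordLabel, nameLabel, PySem.Set.empty]

set_option maxHeartbeats 1000000 in
set_option maxRecDepth 8192 in
theorem contains_e5 (content : String) (functions : List (List (String × String))) :
    PySem.Set.contains (functions.foldl
      (fun acc f =>
        match (PySem.Dict.mk nameLabel).get? (PySem.Str.lower (((PySem.Dict.mk f).get? "name").getD "")) with
        | some label => PySem.Set.add acc label
        | none => acc)
      (keywordLabel.foldl
        (fun acc kl => if PySem.Str.isIn kl.1 (PySem.Str.lower content) then PySem.Set.add acc kl.2 else acc)
        PySem.Set.empty)) "remote_operations" = (["ssh", "paramiko", "remote", "server"].any (fun w => PySem.Str.isIn w (PySem.Str.lower content))) := by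
  rw [Bool.eq_iff_iff, PySem.Set.contains_iff, mem_fold_name, mem_fold_keyword]
  simp only [lookup_nameLabel]
  simp [keywordLabel, nameLabel, PySem.Set.empty]

set_option maxHeartbeats 1000000 in
set_option maxRecDepth 8192 in
theorem contains_e6 (content : String) (functions : List (List (String × String))) :
    PySem.Set.contains (functions.foldl
      (fun acc f =>
        match (PySem.Dict.mk nameLabel).get? (PySem.Str.lower (((PySem.Dict.mk f).get? "name").getD "")) with
        | some label => PySem.Set.add acc label
        | none => acc)
      (keywordLabel.foldl
        (fun acc kl => if PySem.Str.isIn kl.1 (PySem.Str.lower content) then PySem.Set.add acc kl.2 else acc)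
        PySem.Set.empty)) "reporting" = (["report", "summary", "analytics"].any (fun w => PySem.Str.isIn w (PySem.Str.lower content))) := by
  rw [Bool.eq_iff_iff, PySem.Set.contains_iff, mem_fold_name, mem_fold_keyword]
  simp only [lookup_nameLabel]
  simp [keywordLabel, nameLabel, PySem.Set.empty]

set_option maxHeartbeats 1000000 in
set_option maxRecDepth 8192 in
theorem contains_e7 (content : String) (functions : List (List (String × String))) :
    PySem.Set.contains (functions.foldl
      (fun acc f =>
        match (PySem.Dict.mk nameLabel).get? (PySem.Str.lower (((PySem.Dict.mk f).get? "name").getD "")) with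
        | some label => PySem.Set.add acc label
        | none => acc)
      (keywordLabel.foldl
        (fun acc kl => if PySem.Str.isIn kl.1 (PySem.Str.lower content) then PySem.Set.add acc kl.2 else acc)
        PySem.Set.empty)) "system_management" = (["agent", "onboard", "workspace"].any (fun w => PySem.Str.isIn w (PySem.Str.lower content))) := by
  rw [Bool.eq_iff_iff, PySem.Set.contains_iff, mem_fold_name, mem_fold_keyword]
  simp only [lookup_nameLabel]
  simp [keywordLabel, nameLabel, PySem.Set.empty]

set_option maxHeartbeats 1000000 in
set_option maxRecDepth 8192 in
theorem contains_f1 (content : String) (functions : List (List (String × String))) :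
    PySem.Set.contains (functions.foldl
      (fun acc f =>
        match (PySem.Dict.mk nameLabel).get? (PySem.Str.lower (((PySem.Dict.mk f).get? "name").getD "")) with
        | some label => PySem.Set.add acc label
        | none => acc)
      (keywordLabel.foldl
        (fun acc kl => if PySem.Str.isIn kl.1 (PySem.Str.lower content) then PySem.Set.add acc kl.2 else acc)
        PySem.Set.empty)) "wordpress_operations" = (["create_page", "update_post", "validate_url"].any (fun n => (functions.map (fun f => PySem.Str.lower (((PySem.Dict.mk f).get? "name").getD ""))).contains n)) := by
  rw [Bool.eq_iff_iff, PySem.Set.contains_iff, mem_fold_name, mem_fold_keyword]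
  simp only [lookup_nameLabel]
  simp [keywordLabel, nameLabel, PySem.Set.empty]
  constructor
  · rintro ⟨f, hf, h | h | h⟩
    exacts [Or.inl ⟨f, hf, h.symm⟩, Or.inr (Or.inl ⟨f, hf, h.symm⟩), Or.inr (Or.inr ⟨f, hf, h.symm⟩)]
  · rintro (⟨f, hf, h⟩ | ⟨f, hf, h⟩ | ⟨f, hf, h⟩)
    exacts [⟨f, hf, Or.inl h.symm⟩, ⟨f, hf, Or.inr (Or.inl h.symm)⟩, ⟨f, hf, Or.inr (Or.inr h.symm)⟩]

set_option maxHeartbeats 1000000 in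
set_option maxRecDepth 8192 in
theorem contains_f2 (content : String) (functions : List (List (String × String))) :
    PySem.Set.contains (functions.foldl
      (fun acc f =>
        match (PySem.Dict.mk nameLabel).get? (PySem.Str.lower (((PySem.Dict.mk f).get? "name").getD "")) with
        | some label => PySem.Set.add acc label
        | none => acc)
      (keywordLabel.foldl
        (fun acc kl => if PySem.Str.isIn kl.1 (PySem.Str.lower content) then PySem.Set.add acc kl.2 else acc)
        PySem.Set.empty)) "validation_operations" = (["run_validation", "check_status"].any (fun n => (functions.map (fun f => PySem.Str.lower (((PySem.Dict.mk f).get? "name").getD ""))).contains n)) := by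
  rw [Bool.eq_iff_iff, PySem.Set.contains_iff, mem_fold_name, mem_fold_keyword]
  simp only [lookup_nameLabel]
  simp [keywordLabel, nameLabel, PySem.Set.empty]
  constructor
  · rintro ⟨f, hf, h | h⟩
    exacts [Or.inl ⟨f, hf, h.symm⟩, Or.inr ⟨f, hf, h.symm⟩]
  · rintro (⟨f, hf, h⟩ | ⟨f, hf, h⟩)
    exacts [⟨f, hf, Or.inl h.symm⟩, ⟨f, hf, Or.inr h.symm⟩]

-- ===== VERDICT (by name: the statement is the Claim_ definition above) =====
set_option maxHeartbeats 4000000 in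
theorem analyze_capabilities_py_spec : Claim_equal_analyze_capabilities_py := by
  intro content functions _ _
  unfold Spec_analyze_capabilities_py
  have hA := bridgeA
    (["wordpress", "wp_cli", "post create"].any (fun w => PySem.Str.isIn w (PySem.Str.lower content)))
    (["page", "post", "content"].any (fun w => PySem.Str.isIn w (PySem.Str.lower content)))
    (["validate", "check", "test", "verify"].any (fun w => PySem.Str.isIn w (PySem.Str.lower content)))
    (["http", "requests", "url"].any (fun w => PySem.Str.isIn w (PySem.Str.lower content)))
    (["ssh", "paramiko", "remote", "server"].any (fun w => PySem.Str.isIn w (PySem.Str.lower content)))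
    (["report", "summary", "analytics"].any (fun w => PySem.Str.isIn w (PySem.Str.lower content)))
    (["agent", "onboard", "workspace"].any (fun w => PySem.Str.isIn w (PySem.Str.lower content)))
    (["create_page", "update_post", "validate_url"].any (fun n => (functions.map (fun f => PySem.Str.lower (((PySem.Dict.mk f).get? "name").getD ""))).contains n))
    (["run_validation", "check_status"].any (fun n => (functions.map (fun f => PySem.Str.lower (((PySem.Dict.mk f).get? "name").getD ""))).contains n))
  refine Eq.trans hA (Eq.symm ?_)
  unfold analyze_capabilities_py_alt
  simp only [filter_labelOrder, contains_e1, contains_e2, contains_e3, contains_e4, contains_e5,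
      contains_e6, contains_e7, contains_f1, contains_f2]
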